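-- pv_equiv track=rewrite | github.com/MuhammadMuneeb007/G2DR-A-Genotype-First-Framework-for-Genetics-Informed-Target-Prioritization-and-Drug-Repurposing | predict4.1.2.1-GetImportantDatabaseFinal.py | detect_train_val_test_labels
-- ===== SOURCE A (Python) =====
-- def detect_train_val_test_labels(dataset_values: list[str]) -> tuple[str, str, str]:
--     train_label = None
--     val_label = None
--     test_label = None
--     for ds in dataset_values:
--         low = str(ds).lower()
--         if "train" in low:
--             train_label = ds
--         elif "val" in low:
--             val_label = ds
--         elif "test" in low:
--             test_label = ds
--     if train_label is None or val_label is None or test_label is None: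
--         raise ValueError(f"Could not detect train/val/test labels from Dataset values: {dataset_values}")
--     return train_label, val_label, test_label
-- ===== SOURCE B (Python) =====
-- def detect_train_val_test_labels(dataset_values: list[str]) -> tuple[str, str, str]:
--     def last_match(pred):
--         return next((ds for ds in reversed(dataset_values) if pred(str(ds).lower())), None)
--     train_label = last_match(lambda low: "train" in low)
--     val_label = last_match(lambda low: "val" in low and "train" not in low)
--     test_label = last_match(lambda low: "test" in low and "train" not in low and "val" not in low)
--     if train_label is None or val_label is None or test_label is None:
--         raise ValueError(f"Could not detect train/val/test labels from Dataset values: {dataset_values}")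
--     return train_label, val_label, test_label
-- ===== Notes on version B (the rewrite author's own statement) =====
-- stated objective: alternative
-- what changed: Replaces the single stateful elif loop by three independent reversed-search passes, each taking the first match from the end, with the elif priority expressed as explicit exclusion predicates.
import Mathlib
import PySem

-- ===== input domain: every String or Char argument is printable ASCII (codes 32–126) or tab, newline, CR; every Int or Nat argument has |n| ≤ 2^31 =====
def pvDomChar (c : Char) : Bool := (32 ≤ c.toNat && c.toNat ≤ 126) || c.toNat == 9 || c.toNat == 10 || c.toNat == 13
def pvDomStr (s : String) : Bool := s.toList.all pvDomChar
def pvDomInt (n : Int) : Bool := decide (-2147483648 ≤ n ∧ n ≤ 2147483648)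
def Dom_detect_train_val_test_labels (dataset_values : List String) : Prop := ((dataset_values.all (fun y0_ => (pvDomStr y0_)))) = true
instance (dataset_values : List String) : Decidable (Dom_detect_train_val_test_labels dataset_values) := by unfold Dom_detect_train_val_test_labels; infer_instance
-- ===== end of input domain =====

-- B replaces A's single stateful elif loop by three independent reversed-search passes
-- (first match from the end, elif priority expressed as explicit exclusion predicates); alternative decomposition, same cost.


-- ===== PORT A =====
-- A's loop: one pass keeping three Option accumulators, elif priority train > val > test.
-- (On inputs where Python A raises ValueError — some accumulator still None — those inputs
-- are outside Pre_; the port returns "" components there.)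
def pvStepA (st : Option String × Option String × Option String) (ds : String) :
    Option String × Option String × Option String :=
  let low := PySem.Str.lower ds
  if PySem.Str.isIn "train" low then (some ds, st.2.1, st.2.2)
  else if PySem.Str.isIn "val" low then (st.1, some ds, st.2.2)
  else if PySem.Str.isIn "test" low then (st.1, st.2.1, some ds)
  else st

def detect_train_val_test_labels (dataset_values : List String) : String × String × String :=
  let st := dataset_values.foldl pvStepA (none, none, none)
  (st.1.getD "", st.2.1.getD "", st.2.2.getD "")

-- ===== PORT B =====
def pvIsTrain (ds : String) : Bool := PySem.Str.isIn "train" (PySem.Str.lower ds)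
def pvIsVal (ds : String) : Bool :=
  PySem.Str.isIn "val" (PySem.Str.lower ds) && !PySem.Str.isIn "train" (PySem.Str.lower ds)
def pvIsTest (ds : String) : Bool :=
  PySem.Str.isIn "test" (PySem.Str.lower ds) && !PySem.Str.isIn "train" (PySem.Str.lower ds)
    && !PySem.Str.isIn "val" (PySem.Str.lower ds)

def pvLastMatch (dataset_values : List String) (p : String → Bool) : Option String :=
  dataset_values.reverse.find? p

def detect_train_val_test_labels_alt (dataset_values : List String) : String × String × String :=
  let train_label := pvLastMatch dataset_values pvIsTrain
  let val_label := pvLastMatch dataset_values pvIsVal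
  let test_label := pvLastMatch dataset_values pvIsTest
  (train_label.getD "", val_label.getD "", test_label.getD "")

-- ===== PRECONDITION & SPEC =====
-- Pre_ excludes exactly the inputs on which Python A raises ValueError (some label undetected).
def Pre_detect_train_val_test_labels (dataset_values : List String) : Prop :=
  (∃ s ∈ dataset_values, pvIsTrain s = true) ∧ (∃ s ∈ dataset_values, pvIsVal s = true) ∧
    (∃ s ∈ dataset_values, pvIsTest s = true)
instance (dataset_values : List String) : Decidable (Pre_detect_train_val_test_labels dataset_values) := by
  unfold Pre_detect_train_val_test_labels; infer_instance

def pvWitness_detect_train_val_test_labels : List String := ["Train", "Val", "Test"]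

def Spec_detect_train_val_test_labels (dataset_values : List String) (out : String × String × String) : Prop := out = detect_train_val_test_labels_alt dataset_values
instance (dataset_values : List String) (out : String × String × String) : Decidable (Spec_detect_train_val_test_labels dataset_values out) := by unfold Spec_detect_train_val_test_labels; infer_instance

-- ===== CLAIM (what is proved, stated in full; the proofs are below) =====
def Claim_equal_detect_train_val_test_labels : Prop := ∀ (dataset_values : List String), Dom_detect_train_val_test_labels dataset_values → Pre_detect_train_val_test_labels dataset_values → Spec_detect_train_val_test_labels dataset_values (detect_train_val_test_labels dataset_values)

-- ===== LEMMAS AND PROOFS =====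

theorem foldl_pvStepA (xs : List String) (st : Option String × Option String × Option String) :
    xs.foldl pvStepA st =
      ((xs.reverse.find? pvIsTrain).or st.1, (xs.reverse.find? pvIsVal).or st.2.1,
        (xs.reverse.find? pvIsTest).or st.2.2) := by
  induction xs generalizing st with
  | nil => simp
  | cons a rest ih =>
    by_cases h1 : PySem.Chars.isIn ['t','r','a','i','n'] (PySem.Chars.lower a.toList) = true <;>
      by_cases h2 : PySem.Chars.isIn ['v','a','l'] (PySem.Chars.lower a.toList) = true <;>
        by_cases h3 : PySem.Chars.isIn ['t','e','s','t'] (PySem.Chars.lower a.toList) = true <;>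
          simp [pvStepA, pvIsTrain, pvIsVal, pvIsTest, ih, List.find?_append, h1, h2, h3]

-- ===== VERDICT (by name: the statement is the Claim_ definition above) =====
theorem detect_train_val_test_labels_spec : Claim_equal_detect_train_val_test_labels := by
  intro xs _ _
  show _ = _
  simp [detect_train_val_test_labels, detect_train_val_test_labels_alt, foldl_pvStepA, pvLastMatch]
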